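-- pv_equiv track=rewrite | github.com/Portulinas/istKillMe | fp/Sopa de letras/projecto_beta11.py | cadeia_nordeste
-- ===== SOURCE A (Python) =====
-- def coord_linha(c):
--     """
--     coord_linha : coordenada --> N0
--     coord_linha(c) tem como valor a linha da coordenada.
--     """
--     return c[0]
--
-- def coord_coluna(c):
--     """
--     coord_coluna : coordenada --> N0
--     coord_coluna(c) tem como valor a coluna da coordenada.
--     """
--     return c[1]
--
-- def cadeia_nordeste(g,c):
--     lin = coord_linha(c)
--     col = coord_coluna(c)
--     cad = ''
--     while lin != len(g) - 1 and col != 0: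
--         lin = lin + 1
--         col = col - 1
--     while lin != -1 and col != len(g[lin]):
--         cad = cad + g[lin][col]
--         lin = lin - 1
--         col = col + 1
--     return cad
-- ===== SOURCE B (Python) =====
-- def cadeia_nordeste(g, c):
--     lin, col = c
--     d = min(len(g) - 1 - lin, col)
--     r, k = lin + d, col - d
--     chars = []
--     while r >= 0 and k != len(g[r]):
--         chars.append(g[r][k])
--         r -= 1
--         k += 1
--     return ''.join(chars)
-- ===== Notes on version B (the rewrite author's own statement) =====
-- stated objective: simpler
-- what changed: The first positioning while-loop is replaced by the closed-form offset d = min(len(g)-1-lin, col), and the northeast walk collects characters into a list joined once instead of rebuilding the string by concatenation.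
-- outside the precondition, e.g. on cadeia_nordeste(['ab', 'cd'], (0, -1)): A returns 'cb', B returns ''
import Mathlib
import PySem

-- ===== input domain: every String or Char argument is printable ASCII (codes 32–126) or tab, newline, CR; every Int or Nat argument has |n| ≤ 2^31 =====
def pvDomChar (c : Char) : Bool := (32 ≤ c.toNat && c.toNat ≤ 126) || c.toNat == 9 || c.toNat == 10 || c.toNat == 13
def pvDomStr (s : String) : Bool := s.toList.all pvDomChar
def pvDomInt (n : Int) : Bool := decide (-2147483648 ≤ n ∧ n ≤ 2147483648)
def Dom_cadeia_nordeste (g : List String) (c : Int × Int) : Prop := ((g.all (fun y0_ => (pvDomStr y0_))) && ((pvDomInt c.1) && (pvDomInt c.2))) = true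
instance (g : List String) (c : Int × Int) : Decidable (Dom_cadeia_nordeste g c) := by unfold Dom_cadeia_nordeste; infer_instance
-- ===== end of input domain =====

-- B replaces A's first positioning while-loop by the closed-form offset min(len(g)-1-lin, col)
-- and joins a collected char list instead of repeated string concatenation (objective: simpler).

-- ===== PORT A =====
-- A's first while-loop; fuel-driven (the Python loop does not terminate on some inputs
-- outside Pre_); under Pre_ the fuel passed below is sufficient, so the port is exact there.
def pvPhase1 (glen : Int) : Nat → Int → Int → Int × Int
  | 0, lin, col => (lin, col)
  | f + 1, lin, col =>
    if lin ≠ glen - 1 ∧ col ≠ 0 then pvPhase1 glen f (lin + 1) (col - 1) else (lin, col)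

-- A's second while-loop (fuel-driven likewise); cad grows by one char per step,
-- exactly as 'cad = cad + g[lin][col]'.
def pvPhase2 (g : List String) : Nat → Int → Int → List Char → List Char
  | 0, _, _, cad => cad
  | f + 1, lin, col, cad =>
    if lin ≠ -1 ∧ col ≠ ((((PySem.List.pyGet? g lin).getD "").toList.length : Nat) : Int) then
      pvPhase2 g f (lin - 1) (col + 1)
        (cad ++ [(PySem.List.pyGet? ((PySem.List.pyGet? g lin).getD "").toList col).getD ' '])
    else cad

def cadeia_nordeste (g : List String) (c : Int × Int) : String :=
  let lin := c.1
  let col := c.2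
  let p := pvPhase1 (g.length : Int) (col.toNat + 1) lin col
  String.ofList (pvPhase2 g (g.length + 1) p.1 p.2 [])

-- ===== PORT B =====
-- B's single while-loop: walk northeast from (r, k) while r >= 0 and k != len(g[r]).
def pvAltWalk (g : List String) (r k : Int) : List Char :=
  if h : 0 ≤ r ∧ k ≠ ((((PySem.List.pyGet? g r).getD "").toList.length : Nat) : Int) then
    (PySem.List.pyGet? ((PySem.List.pyGet? g r).getD "").toList k).getD ' ' ::
      pvAltWalk g (r - 1) (k + 1)
  else []
termination_by (r + 1).toNat
decreasing_by omega

def cadeia_nordeste_alt (g : List String) (c : Int × Int) : String :=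
  let lin := c.1
  let col := c.2
  let d := min ((g.length : Int) - 1 - lin) col
  String.ofList (pvAltWalk g (lin + d) (col - d))

-- ===== PRECONDITION & SPEC =====
-- Pre_ excludes negative columns and rows ≥ len(g) — there A diverges, raises, or returns a
-- string assembled through Python negative-index wraparound, accidental for coordinates the
-- docstrings restrict to N0 — and ragged grids on which the northeast walk overruns a
-- shorter row before stopping, where A raises IndexError.
def Pre_cadeia_nordeste (g : List String) (c : Int × Int) : Prop :=
  0 ≤ c.2 ∧ c.1 < (g.length : Int) ∧ -1 ≤ c.1 + c.2 ∧
  (g = [] ∨ c.1 + c.2 = -1 ∨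
    ∀ r : Nat, r ≤ min (g.length - 1) (c.1 + c.2).toNat →
      (∀ r' : Nat, r' ≤ min (g.length - 1) (c.1 + c.2).toNat → r < r' →
        ((g[r']?).getD "").toList.length ≠ (c.1 + c.2).toNat - r') →
      (c.1 + c.2).toNat - r ≤ ((g[r]?).getD "").toList.length)
instance (g : List String) (c : Int × Int) : Decidable (Pre_cadeia_nordeste g c) := by
  unfold Pre_cadeia_nordeste; infer_instance

def pvWitness_cadeia_nordeste : List String × (Int × Int) := (["ab", "cd"], (0, 1))

def Spec_cadeia_nordeste (g : List String) (c : Int × Int) (out : String) : Prop := out = cadeia_nordeste_alt g c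
instance (g : List String) (c : Int × Int) (out : String) : Decidable (Spec_cadeia_nordeste g c out) := by unfold Spec_cadeia_nordeste; infer_instance

-- ===== CLAIM (what is proved, stated in full; the proofs are below) =====
def Claim_equal_cadeia_nordeste : Prop := ∀ (g : List String) (c : Int × Int), Dom_cadeia_nordeste g c → Pre_cadeia_nordeste g c → Spec_cadeia_nordeste g c (cadeia_nordeste g c)

-- ===== LEMMAS AND PROOFS =====

-- safety of the walk from row r on anti-diagonal s (the ∀-condition of Pre_, relativised)
def pvSafe (g : List String) (s r : Nat) : Prop :=
  ∀ r' : Nat, r' ≤ r →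
    (∀ r'' : Nat, r' < r'' → r'' ≤ r → ((g[r'']?).getD "").toList.length ≠ s - r'') →
    s - r' ≤ ((g[r']?).getD "").toList.length

lemma pvSafe_step (g : List String) (s r : Nat) (h : pvSafe g s (r + 1))
    (hne : ((g[r + 1]?).getD "").toList.length ≠ s - (r + 1)) : pvSafe g s r := by
  intro r' hr' hinner
  refine h r' (by omega) ?_
  intro r'' h1 h2
  rcases Nat.lt_or_ge r'' (r + 1) with h3 | h3
  · exact hinner r'' h1 (by omega)
  · have : r'' = r + 1 := by omega
    simpa [this] using hne

lemma pvPhase1_eq (n : Nat) :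
    ∀ (f : Nat) (a : Int) (b : Nat), a ≤ (n : Int) - 1 →
      (min ((n : Int) - 1 - a) (b : Int)).toNat < f →
      pvPhase1 (n : Int) f a (b : Int) =
        (a + min ((n : Int) - 1 - a) (b : Int), (b : Int) - min ((n : Int) - 1 - a) (b : Int)) := by
  intro f
  induction f with
  | zero => intro a b _ h; exact absurd h (Nat.not_lt_zero _)
  | succ f ih =>
    intro a b ha hf
    rw [pvPhase1]
    by_cases hc : a ≠ (n : Int) - 1 ∧ (b : Int) ≠ 0
    · rw [if_pos hc]
      have e2 : (b : Int) - 1 = ((b - 1 : Nat) : Int) := by omega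
      rw [e2, ih (a + 1) (b - 1) (by omega) (by omega)]
      simp only [Prod.mk.injEq]
      refine ⟨?_, ?_⟩ <;> omega
    · rw [if_neg hc]
      simp only [Prod.mk.injEq]
      refine ⟨?_, ?_⟩ <;> omega

lemma pvPhase2_neg1 (g : List String) :
    ∀ (f : Nat) (x : Int) (cad : List Char), pvPhase2 g f (-1) x cad = cad := by
  intro f x cad
  cases f with
  | zero => rw [pvPhase2]
  | succ f' => rw [pvPhase2, if_neg (by rintro ⟨u, _⟩; exact u rfl)]

lemma pvAltWalk_neg (g : List String) (r k : Int) (h : r < 0) : pvAltWalk g r k = [] := by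
  rw [pvAltWalk, dif_neg (by rintro ⟨u, _⟩; omega)]

lemma pvWalk_eq (g : List String) (s : Nat) :
    ∀ (r : Nat), r < g.length → r ≤ s → pvSafe g s r →
      ∀ (f : Nat), r < f → ∀ (cad : List Char),
        pvPhase2 g f (r : Int) ((s - r : Nat) : Int) cad =
          cad ++ pvAltWalk g (r : Int) ((s - r : Nat) : Int) := by
  intro r
  induction r with
  | zero =>
    intro hlt _ hsafe f hf cad
    obtain ⟨f, rfl⟩ : ∃ f', f = f' + 1 := ⟨f - 1, by omega⟩
    have hrow : (PySem.List.pyGet? g ((0 : Nat) : Int)).getD "" = g[0] := by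
      rw [PySem.List.pyGet?_natCast]
      simp [List.getElem?_eq_getElem hlt]
    rw [pvPhase2, pvAltWalk, hrow]
    have hlen0 : ((g[0]?).getD "") = g[0] := by simp [List.getElem?_eq_getElem hlt]
    by_cases hstop : s - 0 = (g[0]).toList.length
    · rw [if_neg (by rintro ⟨u1, u2⟩; omega), dif_neg (by rintro ⟨u1, u2⟩; omega)]
      simp
    · have hle : s - 0 ≤ (g[0]).toList.length := by
        have := hsafe 0 (le_refl 0) (by intro r'' h1 h2; omega)
        rwa [hlen0] at this
      rw [if_pos ⟨by omega, by omega⟩, dif_pos ⟨by omega, by omega⟩]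
      have h2 : ∀ f' cad', pvPhase2 g f' (((0 : Nat) : Int) - 1) (((s - 0 : Nat) : Int) + 1) cad' = cad' := by
        intro f' cad'
        cases f' with
        | zero => rw [pvPhase2]
        | succ f'' => rw [pvPhase2, if_neg (by rintro ⟨u1, u2⟩; omega)]
      have h3 : pvAltWalk g (((0 : Nat) : Int) - 1) (((s - 0 : Nat) : Int) + 1) = [] := by
        rw [pvAltWalk, dif_neg (by rintro ⟨u1, u2⟩; omega)]
      rw [h2, h3]
  | succ r ih =>
    intro hlt hle hsafe f hf cad
    obtain ⟨f, rfl⟩ : ∃ f', f = f' + 1 := ⟨f - 1, by omega⟩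
    have hrow : (PySem.List.pyGet? g ((r + 1 : Nat) : Int)).getD "" = g[r + 1] := by
      rw [PySem.List.pyGet?_natCast]
      simp [List.getElem?_eq_getElem hlt]
    rw [pvPhase2, pvAltWalk, hrow]
    have hlen0 : ((g[r + 1]?).getD "") = g[r + 1] := by simp [List.getElem?_eq_getElem hlt]
    by_cases hstop : s - (r + 1) = (g[r + 1]).toList.length
    · rw [if_neg (by rintro ⟨u1, u2⟩; omega), dif_neg (by rintro ⟨u1, u2⟩; omega)]
      simp
    · have hleN : s - (r + 1) ≤ (g[r + 1]).toList.length := by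
        have := hsafe (r + 1) (le_refl _) (by intro r'' h1 h2; omega)
        rwa [hlen0] at this
      rw [if_pos ⟨by omega, by omega⟩, dif_pos ⟨by omega, by omega⟩]
      have e1 : ((r + 1 : Nat) : Int) - 1 = ((r : Nat) : Int) := by push_cast; ring
      have e2 : ((s - (r + 1) : Nat) : Int) + 1 = ((s - r : Nat) : Int) := by omega
      rw [e1, e2]
      have hsafe' : pvSafe g s r := pvSafe_step g s r hsafe (by rw [hlen0]; omega)
      rw [ih (by omega) (by omega) hsafe' f (by omega)]
      simp

-- ===== VERDICT (by name: the statement is the Claim_ definition above) =====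
theorem cadeia_nordeste_spec : Claim_equal_cadeia_nordeste := by
  intro g c _ hpre
  obtain ⟨h2, h1, hm, hsafe0⟩ := hpre
  unfold Spec_cadeia_nordeste
  simp only [cadeia_nordeste, cadeia_nordeste_alt]
  set b := c.2.toNat with hb
  have eb : c.2 = (b : Int) := by omega
  set n := g.length with hn
  rw [eb]
  rw [pvPhase1_eq n (b + 1) c.1 b (by omega) (by omega)]
  simp only []
  set dI := min ((n : Int) - 1 - c.1) (b : Int) with hdI
  by_cases hneg : c.1 + dI < 0
  · have hr : c.1 + dI = -1 := by omega
    rw [hr, pvPhase2_neg1, pvAltWalk_neg g (-1) _ (by norm_num)]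
  · have hn1 : 1 ≤ n := by omega
    have hs0 : 0 ≤ c.1 + (b : Int) := by omega
    set s := (c.1 + (b : Int)).toNat with hs
    set r0 := min (n - 1) s with hr0
    have er0 : c.1 + dI = ((r0 : Nat) : Int) := by omega
    have ec0 : (b : Int) - dI = ((s - r0 : Nat) : Int) := by omega
    rw [er0, ec0]
    have hsum : (c.1 + c.2).toNat = s := by omega
    have hgne : g ≠ [] := by
      intro h; rw [hn, h] at hn1; exact absurd hn1 (by norm_num)
    have hsafe : ∀ r : Nat, r ≤ min (n - 1) (c.1 + c.2).toNat →
        (∀ r' : Nat, r' ≤ min (n - 1) (c.1 + c.2).toNat → r < r' →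
          ((g[r']?).getD "").toList.length ≠ (c.1 + c.2).toNat - r') →
        (c.1 + c.2).toNat - r ≤ ((g[r]?).getD "").toList.length := by
      rcases hsafe0 with h | h | h
      · exact absurd h hgne
      · exact absurd h (by omega)
      · exact h
    rw [hsum] at hsafe
    have hsafe' : pvSafe g s r0 := by
      intro r' hr' hinner
      exact hsafe r' (by omega) (fun r'' hb2 hlt => hinner r'' hlt (by omega))
    rw [pvWalk_eq g s r0 (by omega) (by omega) hsafe' (n + 1) (by omega) []]
    simp
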